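-- pv_equiv track=rewrite | github.com/madhavkr1506/python-programming | random-leetcode-que/NonOverlappingMeeting.py | solution
-- ===== SOURCE A (Python) =====
-- def solution(events) -> int: # TC: O(n**2)
--     try:
--         n = len(events)
--
--         max_val = 0
--
--         events.sort()
--         for s, e, v in events:
--             max_val = max(max_val, v)
--
--         for i in range (n):
--             s1, e1, v1 = events[i]
--             for j in range (i+1, n):
--                 s2, e2, v2 = events[j]
--                 if s2 > e1:
--                     max_val = max(max_val, v1 + v2)
--         return max_val
--
--     except Exception as e:
--         raise Exception(str(e))
-- ===== SOURCE B (Python) =====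
-- def solution(events) -> int:
--     evs = sorted(events)
--     n = len(evs)
--     starts = [t[0] for t in evs]
--     suf = [0] * (n + 1)
--     for k in range(n - 1, -1, -1):
--         suf[k] = max(suf[k + 1], evs[k][2])
--     best = suf[0]
--     for i in range(n):
--         e = evs[i][1]
--         lo, hi = i + 1, n
--         while lo < hi:
--             mid = (lo + hi) // 2
--             if starts[mid] <= e:
--                 lo = mid + 1
--             else:
--                 hi = mid
--         if lo < n:
--             best = max(best, evs[i][2] + suf[lo])
--     return best
-- ===== Notes on version B (the rewrite author's own statement) =====
-- stated objective: faster
-- what changed: A's quadratic scan over all ordered pairs of the sorted events is replaced by suffix maxima of the values plus a per-event binary search for the first later event starting after its end.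
import Mathlib
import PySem

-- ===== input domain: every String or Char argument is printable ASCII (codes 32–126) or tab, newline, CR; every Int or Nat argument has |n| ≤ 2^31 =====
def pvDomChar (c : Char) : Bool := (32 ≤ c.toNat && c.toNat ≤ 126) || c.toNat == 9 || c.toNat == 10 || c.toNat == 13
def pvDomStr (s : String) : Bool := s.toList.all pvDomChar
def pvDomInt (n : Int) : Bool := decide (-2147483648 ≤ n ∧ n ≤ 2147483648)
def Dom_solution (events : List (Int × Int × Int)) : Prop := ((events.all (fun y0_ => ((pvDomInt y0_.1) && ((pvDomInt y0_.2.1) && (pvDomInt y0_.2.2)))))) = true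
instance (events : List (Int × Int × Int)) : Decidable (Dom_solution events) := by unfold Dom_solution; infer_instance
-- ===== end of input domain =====

-- B replaces A's quadratic all-pairs scan by sort + suffix maxima + per-event binary search.
-- NOTE: Python A sorts `events` in place (observable mutation); B does not — the equivalence proved is about the return value only.

-- Python's lexicographic `<` on int 3-tuples (both Pythons sort the tuples; PySem.List.sorted/sorted2
-- take 1-/2-component keys only, so the comparator is written out; the sort below is the same stable
-- insertion sort PySem.List.sorted performs — cf. PySem.List.sorted_eq_foldl_insertBy).
def pyLt3 (a b : Int × Int × Int) : Bool :=
  decide (a.1 < b.1) || (a.1 == b.1 && (decide (a.2.1 < b.2.1) || (a.2.1 == b.2.1 && decide (a.2.2 < b.2.2))))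

def pySort3 (xs : List (Int × Int × Int)) : List (Int × Int × Int) :=
  xs.foldl (fun acc x => PySem.List.insertBy pyLt3 x acc) []

-- ===== PORT A =====
def solution (events : List (Int × Int × Int)) : Int :=
  let evs := pySort3 events
  let n := evs.length
  -- for s, e, v in events: max_val = max(max_val, v)
  let m0 := evs.foldl (fun acc x => max acc x.2.2) 0
  -- for i in range(n): for j in range(i+1, n): if s2 > e1: max_val = max(max_val, v1 + v2)
  (List.range n).foldl (fun acc i =>
    let x := evs.getD i (0, 0, 0)
    (List.range' (i + 1) (n - (i + 1))).foldl (fun acc2 j =>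
      let y := evs.getD j (0, 0, 0)
      if x.2.1 < y.1 then max acc2 (x.2.2 + y.2.2) else acc2) acc) m0

-- ===== PORT B =====
-- the hand-written binary search of Source B: first index in [lo, hi) whose start exceeds e
def bsearch (starts : List Int) (e : Int) (lo hi : Nat) : Nat :=
  if _h : lo < hi then
    let mid := (lo + hi) / 2
    if starts.getD mid 0 ≤ e then bsearch starts e (mid + 1) hi
    else bsearch starts e lo mid
  else lo
termination_by hi - lo
decreasing_by all_goals omega

-- Source B's suffix-maximum array: suf[k] = max(suf[k+1], evs[k][2]), suf[n] = 0
def sufMax : List (Int × Int × Int) → List Int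
  | [] => [0]
  | x :: xs => (max ((sufMax xs).getD 0 0) x.2.2) :: sufMax xs

def solution_alt (events : List (Int × Int × Int)) : Int :=
  let evs := pySort3 events
  let n := evs.length
  let starts := evs.map (fun t => t.1)
  let suf := sufMax evs
  (List.range n).foldl (fun best i =>
    let x := evs.getD i (0, 0, 0)
    let lo := bsearch starts x.2.1 (i + 1) n
    if lo < n then max best (x.2.2 + suf.getD lo 0) else best) (suf.getD 0 0)

-- ===== PRECONDITION & SPEC =====
def Spec_solution (events : List (Int × Int × Int)) (out : Int) : Prop := out = solution_alt events
instance (events : List (Int × Int × Int)) (out : Int) : Decidable (Spec_solution events out) := by unfold Spec_solution; infer_instance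

-- ===== CLAIM (what is proved, stated in full; the proofs are below) =====
def Claim_equal_solution : Prop := ∀ (events : List (Int × Int × Int)), Dom_solution events → Spec_solution events (solution events)

-- ===== LEMMAS AND PROOFS =====

theorem lt3_iff (a b : Int × Int × Int) : pyLt3 a b = true ↔
    (a.1 < b.1 ∨ (a.1 = b.1 ∧ (a.2.1 < b.2.1 ∨ (a.2.1 = b.2.1 ∧ a.2.2 < b.2.2)))) := by
  simp only [pyLt3, Bool.or_eq_true, Bool.and_eq_true, decide_eq_true_eq, beq_iff_eq]

-- pyLt3's non-strict companion: a ≤ b in the lexicographic order iff ¬(b < a)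
theorem le3_fst {a b : Int × Int × Int} (h : pyLt3 b a = false) : a.1 ≤ b.1 := by
  rw [Bool.eq_false_iff, ne_eq, lt3_iff] at h
  omega

theorem lt3_asymm {a b : Int × Int × Int} (h : pyLt3 a b = true) : pyLt3 b a = false := by
  rw [lt3_iff] at h
  rw [Bool.eq_false_iff, ne_eq, lt3_iff]
  omega

theorem le3_trans {a b c : Int × Int × Int} (h1 : pyLt3 b a = false) (h2 : pyLt3 c b = false) :
    pyLt3 c a = false := by
  rw [Bool.eq_false_iff, ne_eq, lt3_iff] at h1 h2 ⊢
  omega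

-- insertion keeps the list pairwise-sorted under the non-strict order
theorem insertBy_pairwise (x : Int × Int × Int) (ys : List (Int × Int × Int))
    (h : ys.Pairwise (fun a b => pyLt3 b a = false)) :
    (PySem.List.insertBy pyLt3 x ys).Pairwise (fun a b => pyLt3 b a = false) := by
  induction ys with
  | nil => simp [PySem.List.insertBy]
  | cons y ys ih =>
    rw [List.pairwise_cons] at h
    obtain ⟨hy, hys⟩ := h
    rw [PySem.List.insertBy]
    by_cases hc : pyLt3 x y = true
    · rw [if_pos hc]
      rw [List.pairwise_cons]
      refine ⟨?_, List.Pairwise.cons hy hys⟩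
      intro z hz
      rcases List.mem_cons.mp hz with rfl | hz'
      · exact lt3_asymm hc
      · exact le3_trans (lt3_asymm hc) (hy z hz')
    · rw [if_neg hc]
      rw [List.pairwise_cons]
      refine ⟨?_, ih hys⟩
      intro z hz
      rcases (PySem.List.mem_insertBy pyLt3 x z ys).mp hz with rfl | hz'
      · exact Bool.eq_false_iff.mpr (fun hh => hc hh)
      · exact hy z hz'

theorem pySort3_pairwise (events : List (Int × Int × Int)) :
    (pySort3 events).Pairwise (fun a b => pyLt3 b a = false) := by
  unfold pySort3
  have : ∀ (xs acc : List (Int × Int × Int)), acc.Pairwise (fun a b => pyLt3 b a = false) →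
      (xs.foldl (fun acc x => PySem.List.insertBy pyLt3 x acc) acc).Pairwise
        (fun a b => pyLt3 b a = false) := by
    intro xs
    induction xs with
    | nil => intro acc h; exact h
    | cons x xs ih =>
      intro acc h
      exact ih _ (insertBy_pairwise x acc h)
  exact this events [] List.Pairwise.nil

-- first components of the sorted list are monotone (getD form)
theorem sorted_fst_mono (events : List (Int × Int × Int)) :
    ∀ p q : Nat, p ≤ q → q < (pySort3 events).length →
      ((pySort3 events).getD p (0,0,0)).1 ≤ ((pySort3 events).getD q (0,0,0)).1 := by
  intro p q hpq hq
  have hp : p < (pySort3 events).length := lt_of_le_of_lt hpq hq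
  rcases Nat.lt_or_ge p q with hlt | hge
  · have hpw := pySort3_pairwise events
    rw [List.pairwise_iff_getElem] at hpw
    have := hpw p q hp hq hlt
    rw [List.getD_eq_getElem _ _ hp, List.getD_eq_getElem _ _ hq]
    exact le3_fst this
  · have : p = q := le_antisymm hpq hge
    subst this; exact le_refl _

theorem getD_map_fst (L : List (Int × Int × Int)) (j : Nat) (hj : j < L.length) :
    (L.map (fun t => t.1)).getD j 0 = (L.getD j (0,0,0)).1 := by
  have hj' : j < (L.map (fun t => t.1)).length := by simpa using hj
  rw [List.getD_eq_getElem _ _ hj', List.getD_eq_getElem _ _ hj, List.getElem_map]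

theorem bsearch_spec_aux (s : List Int) (e : Int)
    (hm : ∀ p q : Nat, p ≤ q → q < s.length → s.getD p 0 ≤ s.getD q 0) :
    ∀ (fuel lo hi : Nat), hi - lo ≤ fuel → lo ≤ hi → hi ≤ s.length →
      lo ≤ bsearch s e lo hi ∧ bsearch s e lo hi ≤ hi ∧
      (∀ j : Nat, lo ≤ j → j < bsearch s e lo hi → s.getD j 0 ≤ e) ∧
      (∀ j : Nat, bsearch s e lo hi ≤ j → j < hi → e < s.getD j 0) := by
  intro fuel
  induction fuel with
  | zero =>
    intro lo hi hfuel hle hlen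
    have : hi = lo := by omega
    subst this
    rw [bsearch]
    rw [dif_neg (lt_irrefl _)]
    exact ⟨le_refl _, le_refl _, fun j h1 h2 => absurd (lt_of_le_of_lt h1 h2) (lt_irrefl _),
           fun j h1 h2 => absurd (lt_of_le_of_lt h1 h2) (lt_irrefl _)⟩
  | succ f ih =>
    intro lo hi hfuel hle hlen
    rw [bsearch]
    by_cases hlh : lo < hi
    · rw [dif_pos hlh]
      have hmidlo : lo ≤ (lo + hi) / 2 := by omega
      have hmidhi : (lo + hi) / 2 < hi := by omega
      by_cases hcmp : s.getD ((lo + hi) / 2) 0 ≤ e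
      · rw [if_pos hcmp]
        obtain ⟨b1, b2, b3, b4⟩ := ih ((lo + hi) / 2 + 1) hi (by omega) (by omega) hlen
        refine ⟨by omega, b2, ?_, b4⟩
        intro j hj1 hj2
        by_cases hjm : j ≤ (lo + hi) / 2
        · exact le_trans (hm j ((lo + hi) / 2) hjm (by omega)) hcmp
        · exact b3 j (by omega) hj2
      · rw [if_neg hcmp]
        obtain ⟨b1, b2, b3, b4⟩ := ih lo ((lo + hi) / 2) (by omega) (by omega) (by omega)
        refine ⟨b1, by omega, b3, ?_⟩
        intro j hj1 hj2
        by_cases hjm : (lo + hi) / 2 ≤ j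
        · exact lt_of_lt_of_le (lt_of_not_ge hcmp) (hm ((lo + hi) / 2) j hjm (by omega))
        · exact b4 j hj1 (by omega)
    · rw [dif_neg hlh]
      have : hi = lo := by omega
      subst this
      exact ⟨le_refl _, le_refl _, fun j h1 h2 => absurd (lt_of_le_of_lt h1 h2) (lt_irrefl _),
             fun j h1 h2 => absurd (lt_of_le_of_lt h1 h2) (lt_irrefl _)⟩

theorem bsearch_spec (s : List Int) (e : Int)
    (hm : ∀ p q : Nat, p ≤ q → q < s.length → s.getD p 0 ≤ s.getD q 0)
    (lo hi : Nat) (hle : lo ≤ hi) (hlen : hi ≤ s.length) :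
    lo ≤ bsearch s e lo hi ∧ bsearch s e lo hi ≤ hi ∧
    (∀ j : Nat, lo ≤ j → j < bsearch s e lo hi → s.getD j 0 ≤ e) ∧
    (∀ j : Nat, bsearch s e lo hi ≤ j → j < hi → e < s.getD j 0) :=
  bsearch_spec_aux s e hm (hi - lo) lo hi (le_refl _) hle hlen

theorem sufMax_getD (L : List (Int × Int × Int)) :
    ∀ k : Nat, k ≤ L.length → (sufMax L).getD k 0 = ((L.drop k).map (fun x => x.2.2)).foldr max 0 := by
  induction L with
  | nil =>
    intro k hk
    have : k = 0 := by simpa using hk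
    subst this; rfl
  | cons x xs ih =>
    intro k hk
    cases k with
    | zero =>
      simp only [sufMax, List.getD_cons_zero, List.drop_zero, List.map_cons, List.foldr_cons]
      rw [ih 0 (Nat.zero_le _)]
      simp [max_comm]
    | succ k' =>
      simp only [sufMax, List.getD_cons_succ, List.drop_succ_cons]
      exact ih k' (by simpa using hk)

theorem map_getD_range' (L : List (Int × Int × Int)) :
    ∀ (k r : Nat), r + k ≤ L.length →
      (List.range' r k).map (fun j => L.getD j (0,0,0)) = (L.drop r).take k := by
  intro k
  induction k with
  | zero => intro r _; simp
  | succ k' ih =>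
    intro r hr
    have hrlen : r < L.length := by omega
    rw [List.range'_succ, List.map_cons, ih (r + 1) (by omega),
        List.drop_eq_getElem_cons hrlen, List.take_succ_cons, List.getD_eq_getElem _ _ hrlen]

theorem inner_true_fold (v : Int) :
    ∀ (t : List (Int × Int × Int)) (acc : Int), v ≤ acc → t ≠ [] →
      t.foldl (fun a y => max a (v + y.2.2)) acc = max acc (v + (t.map (fun x => x.2.2)).foldr max 0) := by
  intro t
  induction t with
  | nil => intro acc _ h; exact absurd rfl h
  | cons y t' ih =>
    intro acc hva _
    simp only [List.foldl_cons, List.map_cons, List.foldr_cons]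
    cases t' with
    | nil =>
      simp only [List.foldl_nil, List.map_nil, List.foldr_nil]
      omega
    | cons z t'' =>
      rw [ih (max acc (v + y.2.2)) (le_trans hva (le_max_left _ _)) (by simp)]
      omega

-- the two loop bodies agree at one index, provided acc already dominates that event's value
theorem step_eq (L : List (Int × Int × Int))
    (hm : ∀ p q : Nat, p ≤ q → q < L.length → (L.getD p (0,0,0)).1 ≤ (L.getD q (0,0,0)).1)
    (i : Nat) (hi : i < L.length) (acc : Int) (hacc : (L.getD i (0,0,0)).2.2 ≤ acc) :
    (List.range' (i + 1) (L.length - (i + 1))).foldl (fun acc2 j =>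
        if (L.getD i (0,0,0)).2.1 < (L.getD j (0,0,0)).1 then
          max acc2 ((L.getD i (0,0,0)).2.2 + (L.getD j (0,0,0)).2.2) else acc2) acc
    = (if bsearch (L.map (fun t => t.1)) (L.getD i (0,0,0)).2.1 (i + 1) L.length < L.length then
        max acc ((L.getD i (0,0,0)).2.2 +
          (sufMax L).getD (bsearch (L.map (fun t => t.1)) (L.getD i (0,0,0)).2.1 (i + 1) L.length) 0)
      else acc) := by
  set e := (L.getD i (0,0,0)).2.1 with he
  set v := (L.getD i (0,0,0)).2.2 with hv
  have hmlen : (L.map (fun t => t.1)).length = L.length := by simp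
  have hsm : ∀ p q : Nat, p ≤ q → q < (L.map (fun t => t.1)).length →
      (L.map (fun t => t.1)).getD p 0 ≤ (L.map (fun t => t.1)).getD q 0 := by
    intro p q hpq hq
    rw [hmlen] at hq
    rw [getD_map_fst L p (lt_of_le_of_lt hpq hq), getD_map_fst L q hq]
    exact hm p q hpq hq
  obtain ⟨b1, b2, b3, b4⟩ := bsearch_spec (L.map (fun t => t.1)) e hsm (i + 1) L.length
    (by omega) (by rw [hmlen])
  set r := bsearch (L.map (fun t => t.1)) e (i + 1) L.length with hr
  have hsplit : List.range' (i + 1) (L.length - (i + 1)) =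
      List.range' (i + 1) (r - (i + 1)) ++ List.range' r (L.length - r) := by
    have h2 := List.range'_append (s := i + 1) (m := r - (i + 1)) (n := L.length - r) (step := 1)
    rw [show i + 1 + 1 * (r - (i + 1)) = r by omega] at h2
    rw [show L.length - (i + 1) = (r - (i + 1)) + (L.length - r) by omega]
    exact h2.symm
  rw [hsplit, List.foldl_append]
  have hfirst : (List.range' (i + 1) (r - (i + 1))).foldl (fun acc2 j =>
      if e < (L.getD j (0,0,0)).1 then max acc2 (v + (L.getD j (0,0,0)).2.2) else acc2) acc = acc := by
    rw [PySem.List.foldl_ite_eq_foldl_filter]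
    have : (List.range' (i + 1) (r - (i + 1))).filter (fun j => decide (e < (L.getD j (0,0,0)).1)) = [] := by
      rw [List.filter_eq_nil_iff]
      intro j hj
      rw [List.mem_range'_1] at hj
      have hjr : j < r := by omega
      have hjlen : j < L.length := by omega
      have := b3 j (by omega) hjr
      rw [getD_map_fst L j hjlen] at this
      simp only [decide_eq_true_eq]
      omega
    rw [this, List.foldl_nil]
  rw [hfirst]
  by_cases hrn : r < L.length
  · rw [if_pos hrn]
    have hcong : (List.range' r (L.length - r)).foldl (fun acc2 j =>
        if e < (L.getD j (0,0,0)).1 then max acc2 (v + (L.getD j (0,0,0)).2.2) else acc2) acc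
        = (List.range' r (L.length - r)).foldl (fun acc2 j => max acc2 (v + (L.getD j (0,0,0)).2.2)) acc := by
      apply PySem.List.foldl_congr_mem
      intro a j hj
      rw [List.mem_range'_1] at hj
      have hjlen : j < L.length := by omega
      have := b4 j (by omega) (by omega)
      rw [getD_map_fst L j hjlen] at this
      simp only [this, if_true]
    rw [hcong]
    have hmapfold : (List.range' r (L.length - r)).foldl (fun acc2 j => max acc2 (v + (L.getD j (0,0,0)).2.2)) acc
        = ((List.range' r (L.length - r)).map (fun j => L.getD j (0,0,0))).foldl (fun a y => max a (v + y.2.2)) acc := by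
      rw [List.foldl_map]
    rw [hmapfold, map_getD_range' L (L.length - r) r (by omega)]
    have hdroptake : (L.drop r).take (L.length - r) = L.drop r := by
      rw [← List.length_drop]
      exact List.take_length
    rw [hdroptake]
    have hne : L.drop r ≠ [] := by
      apply List.ne_nil_of_length_pos
      rw [List.length_drop]; omega
    rw [inner_true_fold v (L.drop r) acc hacc hne, sufMax_getD L r (by omega)]
  · rw [if_neg hrn]
    have : L.length - r = 0 := by omega
    rw [this]
    rfl

-- whole-loop correspondence, threading the invariant "acc dominates every event value"
theorem main_fold (L : List (Int × Int × Int))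
    (hm : ∀ p q : Nat, p ≤ q → q < L.length → (L.getD p (0,0,0)).1 ≤ (L.getD q (0,0,0)).1) :
    ∀ (js : List Nat) (acc : Int), (∀ i ∈ js, i < L.length) → (∀ x ∈ L, x.2.2 ≤ acc) →
      js.foldl (fun acc i =>
        (List.range' (i + 1) (L.length - (i + 1))).foldl (fun acc2 j =>
          if (L.getD i (0,0,0)).2.1 < (L.getD j (0,0,0)).1 then
            max acc2 ((L.getD i (0,0,0)).2.2 + (L.getD j (0,0,0)).2.2) else acc2) acc) acc
      = js.foldl (fun best i =>
        if bsearch (L.map (fun t => t.1)) ((L.getD i (0,0,0)).2.1) (i + 1) L.length < L.length then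
          max best ((L.getD i (0,0,0)).2.2 +
            (sufMax L).getD (bsearch (L.map (fun t => t.1)) ((L.getD i (0,0,0)).2.1) (i + 1) L.length) 0)
        else best) acc := by
  intro js
  induction js with
  | nil => intro acc _ _; rfl
  | cons i js' ih =>
    intro acc hmem hinv
    simp only [List.foldl_cons]
    have hi : i < L.length := hmem i (List.mem_cons_self ..)
    have hgd : L.getD i (0,0,0) ∈ L := by
      rw [List.getD_eq_getElem _ _ hi]; exact List.getElem_mem hi
    have hacc : (L.getD i (0,0,0)).2.2 ≤ acc := hinv _ hgd
    rw [step_eq L hm i hi acc hacc]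
    set acc' := (if bsearch (L.map (fun t => t.1)) ((L.getD i (0,0,0)).2.1) (i + 1) L.length < L.length then
          max acc ((L.getD i (0,0,0)).2.2 +
            (sufMax L).getD (bsearch (L.map (fun t => t.1)) ((L.getD i (0,0,0)).2.1) (i + 1) L.length) 0)
        else acc) with hacc'
    have hge : acc ≤ acc' := by
      rw [hacc']; split
      · exact le_max_left _ _
      · exact le_refl _
    exact ih acc' (fun j hj => hmem j (List.mem_cons_of_mem _ hj))
      (fun x hx => le_trans (hinv x hx) hge)

theorem foldl_max_eq_foldr (l : List Int) : ∀ a : Int, l.foldl max a = l.foldr max a := by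
  induction l with
  | nil => intro a; rfl
  | cons x l' ih =>
    intro a
    simp only [List.foldl_cons, List.foldr_cons, ← ih]
    clear ih
    induction l' generalizing a x with
    | nil => simp [max_comm]
    | cons y l'' ih2 =>
      simp only [List.foldl_cons]
      rw [show max (max a x) y = max (max a y) x from max_right_comm a x y, ih2 x (max a y)]

theorem foldl_max_proj (L : List (Int × Int × Int)) :
    ∀ a : Int, L.foldl (fun acc x => max acc x.2.2) a = (L.map (fun x => x.2.2)).foldl max a := by
  induction L with
  | nil => intro a; rfl
  | cons x xs ih => intro a; simp only [List.foldl_cons, List.map_cons]; exact ih _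

-- the initial accumulators agree: A's "max of all values with 0" is B's suf[0]
theorem init_eq (L : List (Int × Int × Int)) :
    L.foldl (fun acc x => max acc x.2.2) 0 = (sufMax L).getD 0 0 := by
  rw [sufMax_getD L 0 (Nat.zero_le _), List.drop_zero, foldl_max_proj L 0, foldl_max_eq_foldr]

-- ===== VERDICT (by name: the statement is the Claim_ definition above) =====
theorem solution_spec : Claim_equal_solution := by
  intro events _
  show solution events = solution_alt events
  simp only [solution, solution_alt]
  rw [init_eq]
  apply main_fold (pySort3 events) (sorted_fst_mono events)
  · intro i hi; exact List.mem_range.mp hi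
  · intro x hx
    have h := (PySem.List.le_foldl_max_int (pySort3 events) (fun x => x.2.2) 0).2 x hx
    rw [init_eq] at h
    exact h
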